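-- pv_equiv track=rewrite | github.com/Lecrut/Diffusion-code-generation | data/code/28_9_7.py | is_largest_greater_than
-- ===== SOURCE A (Python) =====
-- def is_largest_greater_than(data, target):
--     if not data:
--         return False
--     largest = data[0]
--     for x in data[1:]:
--         if x > largest:
--             largest = x
--     return largest > target
-- ===== SOURCE B (Python) =====
-- def is_largest_greater_than(data, target):
--     return any(x > target for x in data)
-- ===== Notes on version B (the rewrite author's own statement) =====
-- stated objective: idiomatic
-- what changed: B drops the running-max accumulator and returns any(x > target for x in data), short-circuiting on the first element exceeding target.
import Mathlib
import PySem

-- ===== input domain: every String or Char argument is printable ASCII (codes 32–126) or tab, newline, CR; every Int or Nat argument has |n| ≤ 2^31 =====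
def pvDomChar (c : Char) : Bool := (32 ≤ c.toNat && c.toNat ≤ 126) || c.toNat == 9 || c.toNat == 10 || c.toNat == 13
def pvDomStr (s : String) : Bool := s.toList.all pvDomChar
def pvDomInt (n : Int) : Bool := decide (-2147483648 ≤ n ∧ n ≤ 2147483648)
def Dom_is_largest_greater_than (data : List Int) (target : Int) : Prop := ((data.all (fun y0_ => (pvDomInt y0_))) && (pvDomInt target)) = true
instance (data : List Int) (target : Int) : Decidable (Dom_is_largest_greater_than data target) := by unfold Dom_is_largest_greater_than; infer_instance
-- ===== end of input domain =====

-- B replaces A's running-max loop with a direct short-circuiting "any element exceeds target" test (idiomatic).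

-- ===== PORT A =====
def is_largest_greater_than (data : List Int) (target : Int) : Bool :=
  match data with
  | [] => false
  | d :: _ =>
    -- largest = data[0]; for x in data[1:]: if x > largest: largest = x
    let largest := (PySem.List.slice data (some 1) none).foldl
      (fun largest x => if x > largest then x else largest) d
    decide (largest > target)

-- ===== PORT B =====
def is_largest_greater_than_alt (data : List Int) (target : Int) : Bool :=
  data.any (fun x => decide (x > target))

-- ===== PRECONDITION & SPEC =====
def Spec_is_largest_greater_than (data : List Int) (target : Int) (out : Bool) : Prop := out = is_largest_greater_than_alt data target
instance (data : List Int) (target : Int) (out : Bool) : Decidable (Spec_is_largest_greater_than data target out) := by unfold Spec_is_largest_greater_than; infer_instance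

-- ===== CLAIM (what is proved, stated in full; the proofs are below) =====
def Claim_equal_is_largest_greater_than : Prop := ∀ (data : List Int) (target : Int), Dom_is_largest_greater_than data target → Spec_is_largest_greater_than data target (is_largest_greater_than data target)

-- ===== LEMMAS AND PROOFS =====

-- the running max exceeds target iff the seed or some list element does
theorem foldl_max_gt (target : Int) (rest : List Int) (d : Int) :
    decide ((rest.foldl (fun largest x => if x > largest then x else largest) d) > target)
      = (decide (d > target) || rest.any (fun x => decide (x > target))) := by
  induction rest generalizing d with
  | nil => simp
  | cons y ys ih =>
    simp only [List.foldl_cons, List.any_cons]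
    by_cases h : y > d <;> simp only [h, ih, reduceIte] <;>
      by_cases h2 : d > target <;> by_cases h3 : y > target <;> simp [h2, h3] <;> omega

-- ===== VERDICT (by name: the statement is the Claim_ definition above) =====
theorem is_largest_greater_than_spec : Claim_equal_is_largest_greater_than := by
  intro data target _
  unfold Spec_is_largest_greater_than is_largest_greater_than is_largest_greater_than_alt
  match data with
  | [] => rfl
  | d :: rest =>
    rw [PySem.List.slice_from_one]
    simp only [List.tail_cons, List.any_cons]
    exact foldl_max_gt target rest d
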